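-- pv_equiv track=rewrite | github.com/DanielCoyote/Nonogramas-de-Colores | NonogramaPinguino.py | deco
-- ===== SOURCE A (Python) =====
-- def deco(individuo, pistas_filas, pistas_columnas):
--     num_filas = len(individuo)
--     num_columnas = len(individuo[0])
--
--     secuencias_filas = []
--     secuencias_columnas = [[] for _ in range(num_columnas)]
--
--     for fila in individuo:
--         secuencia_fila = extraer_secuencias(fila)
--         secuencias_filas.append(secuencia_fila)
--
--     for j in range(num_columnas):
--         columna = [individuo[i][j] for i in range(num_filas)]
--         secuencia_columna = extraer_secuencias(columna)
--         secuencias_columnas[j] = secuencia_columna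
--
--     # secuencias_filas = ajustar_dimension(secuencias_filas, len(pistas_columnas[0]))
--     # secuencias_columnas = ajustar_dimension(secuencias_columnas, len(pistas_filas[0]))
--
--     return secuencias_filas, secuencias_columnas
--
-- def extraer_secuencias(linea):
--     secuencias = []
--     cuenta = 0
--     color_actual = None
--
--     for celda in linea:
--         if celda != 0:  # Si no está vacío
--             if celda == color_actual:
--                 cuenta += 1
--             else:
--                 if cuenta > 0:
--                     secuencias.append({"color": color_actual, "longitud": cuenta})
--                 color_actual = celda
--                 cuenta = 1
--         elif cuenta > 0:  # Si encontramos vacío y teníamos una secuencia en curso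
--             secuencias.append({"color": color_actual, "longitud": cuenta})
--             cuenta = 0
--             color_actual = None
--
--     if cuenta > 0:  # Agregar última secuencia
--         secuencias.append({"color": color_actual, "longitud": cuenta})
--
--     return secuencias
-- ===== SOURCE B (Python) =====
-- def deco(individuo, pistas_filas, pistas_columnas):
--     num_columnas = len(individuo[0])
--
--     secuencias_filas = [_rle(fila) for fila in individuo]
--
--     cols = [[] for _ in range(num_columnas)]
--     for fila in individuo:
--         for j in range(num_columnas):
--             cols[j].append(fila[j])
--     secuencias_columnas = [_rle(col) for col in cols]
--
--     return secuencias_filas, secuencias_columnas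
--
--
-- def _rle(linea):
--     # run-jumping scan: skip zeros, measure each maximal run directly
--     runs = []
--     i = 0
--     n = len(linea)
--     while i < n:
--         c = linea[i]
--         if c == 0:
--             i += 1
--             continue
--         k = i + 1
--         while k < n and linea[k] == c:
--             k += 1
--         runs.append({"color": c, "longitud": k - i})
--         i = k
--     return runs
-- ===== Notes on version B (the rewrite author's own statement) =====
-- stated objective: alternative
-- what changed: Replaces A's per-cell state-machine (cuenta/color_actual) and its per-column index comprehensions by a run-jumping scan that skips zeros and measures each maximal run at once, with the columns rebuilt by a single streaming sweep over the rows instead of one indexed pass per column.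
import Mathlib
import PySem

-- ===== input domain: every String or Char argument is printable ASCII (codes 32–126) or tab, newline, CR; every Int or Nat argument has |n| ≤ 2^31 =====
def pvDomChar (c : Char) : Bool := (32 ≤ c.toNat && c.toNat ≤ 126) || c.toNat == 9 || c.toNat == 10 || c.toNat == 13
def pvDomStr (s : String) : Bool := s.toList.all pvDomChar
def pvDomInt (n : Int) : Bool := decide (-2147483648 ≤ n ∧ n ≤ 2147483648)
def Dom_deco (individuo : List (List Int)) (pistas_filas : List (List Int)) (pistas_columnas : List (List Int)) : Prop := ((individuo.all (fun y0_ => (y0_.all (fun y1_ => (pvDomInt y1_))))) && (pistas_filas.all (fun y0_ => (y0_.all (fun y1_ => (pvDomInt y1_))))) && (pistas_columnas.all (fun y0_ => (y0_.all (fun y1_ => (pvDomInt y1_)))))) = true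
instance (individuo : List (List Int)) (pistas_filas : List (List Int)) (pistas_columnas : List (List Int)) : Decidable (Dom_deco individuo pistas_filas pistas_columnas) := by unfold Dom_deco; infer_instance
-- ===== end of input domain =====

-- B replaces A's per-cell state machine and per-column index comprehensions by a run-jumping
-- scan for each line and a single streaming rebuild of the columns (objective: alternative
-- decomposition, same asymptotic cost).

-- ===== PORT A =====
-- loop body of extraer_secuencias: state = (secuencias, cuenta, color_actual)
-- (the .getD 0 for the appended color is only reached with cuenta > 0, where color_actual is `some`)
def stepA (st : List (List (String × Int)) × Int × Option Int) (celda : Int) :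
    List (List (String × Int)) × Int × Option Int :=
  let (secuencias, cuenta, color_actual) := st
  if celda ≠ 0 then
    if color_actual = some celda then (secuencias, cuenta + 1, color_actual)
    else if cuenta > 0 then
      (secuencias ++ [[("color", color_actual.getD 0), ("longitud", cuenta)]], 1, some celda)
    else (secuencias, 1, some celda)
  else if cuenta > 0 then
    (secuencias ++ [[("color", color_actual.getD 0), ("longitud", cuenta)]], 0, none)
  else (secuencias, cuenta, color_actual)

-- trailing "if cuenta > 0: append last run"
def finishA (st : List (List (String × Int)) × Int × Option Int) : List (List (String × Int)) :=
  if st.2.1 > 0 then st.1 ++ [[("color", st.2.2.getD 0), ("longitud", st.2.1)]] else st.1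

def extraerSecuencias (linea : List Int) : List (List (String × Int)) :=
  finishA (linea.foldl stepA ([], 0, none))

def deco (individuo : List (List Int)) (pistas_filas : List (List Int)) (pistas_columnas : List (List Int)) : (List (List (List (String × Int)))) × (List (List (List (String × Int)))) :=
  -- len(individuo[0]) raises IndexError on [], excluded by Pre_deco (headD [] is unreachable there)
  let num_columnas : Int := ((individuo.headD []).length : Int)
  let secuencias_filas := individuo.map extraerSecuencias
  -- columna = [individuo[i][j] for i in range(num_filas)]; in-range under Pre_deco (getD default unreachable)
  let secuencias_columnas := (PySem.List.pyRange 0 num_columnas 1).map (fun j =>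
    extraerSecuencias (individuo.map (fun fila => PySem.List.pyGetD fila j 0)))
  (secuencias_filas, secuencias_columnas)

-- ===== PORT B =====
-- run-jumping scan of Source B's _rle: skip zeros, measure each maximal run at once
def rle : List Int → List (List (String × Int))
  | [] => []
  | c :: rest =>
    if c = 0 then rle rest
    else [("color", c), ("longitud", ((rest.takeWhile (· == c)).length : Int) + 1)] ::
      rle (rest.dropWhile (· == c))
termination_by l => l.length
decreasing_by
· simp
· exact Nat.lt_succ_of_le (List.length_dropWhile_le _ _)

def deco_alt (individuo : List (List Int)) (pistas_filas : List (List Int)) (pistas_columnas : List (List Int)) : (List (List (List (String × Int)))) × (List (List (List (String × Int)))) :=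
  let num_columnas := (individuo.headD []).length
  let secuencias_filas := individuo.map rle
  -- per-row sweep appending fila[j] to cols[j], as a fold rebuilding the column list
  let cols := individuo.foldl
    (fun cols fila => (PySem.List.enumerate cols).map
      (fun jc => jc.2 ++ [PySem.List.pyGetD fila jc.1 0]))
    (List.replicate num_columnas [])
  (secuencias_filas, cols.map rle)

-- ===== PRECONDITION & SPEC =====
-- Pre_deco excludes exactly the inputs where Python A raises IndexError: the empty grid
-- (individuo[0]) and grids where some row is shorter than row 0 (individuo[i][j]).
def Pre_deco (individuo : List (List Int)) (pistas_filas : List (List Int)) (pistas_columnas : List (List Int)) : Prop :=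
  individuo ≠ [] ∧ ∀ fila ∈ individuo, (individuo.headD []).length ≤ fila.length
instance (individuo : List (List Int)) (pistas_filas : List (List Int)) (pistas_columnas : List (List Int)) : Decidable (Pre_deco individuo pistas_filas pistas_columnas) := by unfold Pre_deco; infer_instance

def pvWitness_deco : List (List Int) × List (List Int) × List (List Int) :=
  ([[1, 0, 1], [2, 2, 0]], [[1]], [[1]])

def Spec_deco (individuo : List (List Int)) (pistas_filas : List (List Int)) (pistas_columnas : List (List Int)) (out : (List (List (List (String × Int)))) × (List (List (List (String × Int))))) : Prop := out = deco_alt individuo pistas_filas pistas_columnas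
instance (individuo : List (List Int)) (pistas_filas : List (List Int)) (pistas_columnas : List (List Int)) (out : (List (List (List (String × Int)))) × (List (List (List (String × Int))))) : Decidable (Spec_deco individuo pistas_filas pistas_columnas out) := by unfold Spec_deco; infer_instance

-- ===== CLAIM (what is proved, stated in full; the proofs are below) =====
def Claim_equal_deco : Prop := ∀ (individuo : List (List Int)) (pistas_filas : List (List Int)) (pistas_columnas : List (List Int)), Dom_deco individuo pistas_filas pistas_columnas → Pre_deco individuo pistas_filas pistas_columnas → Spec_deco individuo pistas_filas pistas_columnas (deco individuo pistas_filas pistas_columnas)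

-- ===== LEMMAS AND PROOFS =====

-- "what remains to be emitted" view of A's state machine
def extraerAux (cuenta : Int) (color : Option Int) : List Int → List (List (String × Int))
  | [] => if cuenta > 0 then [[("color", color.getD 0), ("longitud", cuenta)]] else []
  | celda :: rest =>
    if celda ≠ 0 then
      if color = some celda then extraerAux (cuenta + 1) color rest
      else if cuenta > 0 then
        [("color", color.getD 0), ("longitud", cuenta)] :: extraerAux 1 (some celda) rest
      else extraerAux 1 (some celda) rest
    else if cuenta > 0 then
      [("color", color.getD 0), ("longitud", cuenta)] :: extraerAux 0 none rest
    else extraerAux cuenta color rest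

lemma rle_nil : rle [] = [] := by rw [rle]

lemma rle_cons (c : Int) (rest : List Int) :
    rle (c :: rest) = if c = 0 then rle rest
      else [("color", c), ("longitud", ((rest.takeWhile (· == c)).length : Int) + 1)] ::
        rle (rest.dropWhile (· == c)) := by
  rw [rle]

lemma foldl_stepA_eq_aux (l : List Int) : ∀ (secs : List (List (String × Int))) (cuenta : Int) (color : Option Int),
    finishA (l.foldl stepA (secs, cuenta, color)) = secs ++ extraerAux cuenta color l := by
  induction l with
  | nil => intro secs cuenta color
           simp only [List.foldl_nil, finishA, extraerAux]
           split_ifs <;> simp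
  | cons celda rest ih =>
      intro secs cuenta color
      simp only [List.foldl_cons, stepA, extraerAux]
      split_ifs <;> simp [ih]

lemma aux_eq_rle (l : List Int) :
    (extraerAux 0 none l = rle l) ∧
    (∀ (cuenta c : Int), 0 < cuenta → c ≠ 0 →
      extraerAux cuenta (some c) l =
        [("color", c), ("longitud", cuenta + ((l.takeWhile (· == c)).length : Int))] ::
          rle (l.dropWhile (· == c))) := by
  induction l with
  | nil =>
      refine ⟨by simp [extraerAux, rle_nil], ?_⟩
      intro cuenta c hc _
      simp [extraerAux, rle_nil, hc]
  | cons d rest ih =>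
      constructor
      · by_cases hd : d = 0
        · subst hd; rw [rle_cons]; simpa [extraerAux] using ih.1
        · rw [rle_cons]
          simp only [extraerAux, hd, if_neg, ne_eq, not_false_iff, if_true, reduceCtorEq,
            if_false, show ¬((0:Int) > 0) by omega]
          rw [ih.2 1 d (by omega) hd]
          simp [hd]
          omega
      · intro cuenta c hc hcne
        by_cases hd : d = 0
        · subst hd
          have : ¬((0:Int) == c) = true := by simpa using (Ne.symm hcne)
          simp only [extraerAux, ne_eq, not_true, if_false, hc, if_true, gt_iff_lt,
            List.takeWhile_cons, List.dropWhile_cons, this, if_neg]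
          rw [ih.1]
          simp [rle_cons, hc]
        · by_cases hdc : d = c
          · subst hdc
            have hb : (d == d) = true := by simp
            simp only [extraerAux, ne_eq, hd, not_false_iff, if_true, if_pos rfl,
              List.takeWhile_cons, List.dropWhile_cons, hb, if_true]
            rw [ih.2 (cuenta + 1) d (by omega) hd]
            simp
            omega
          · have hb : ¬((d == c) = true) := by simpa using hdc
            simp only [extraerAux, ne_eq, hd, not_false_iff, if_true,
              List.takeWhile_cons, List.dropWhile_cons, hb, if_neg, hc, gt_iff_lt, if_true,
              show ¬(some c = some d) by simpa using fun h => hdc h.symm]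
            rw [ih.2 1 d (by omega) hd]
            simp [rle_cons, hd, hb]
            omega

lemma extraer_eq_rle : extraerSecuencias = rle := by
  funext l
  have h := foldl_stepA_eq_aux l [] 0 none
  simpa [extraerSecuencias, (aux_eq_rle l).1] using h

-- B's streaming column rebuild, one row at a time
lemma enumerate_map_enumerate {α β : Type} (g : Int → α → β) :
    ∀ (l : List α) (s : Int),
      PySem.List.enumerate ((PySem.List.enumerate l s).map (fun p => g p.1 p.2)) s =
        (PySem.List.enumerate l s).map (fun p => (p.1, g p.1 p.2)) := by
  intro l
  induction l with
  | nil => intro s; simp [PySem.List.enumerate_nil]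
  | cons x xs ih => intro s; simp [PySem.List.enumerate_cons, ih]

lemma foldl_cols (rows : List (List Int)) :
    ∀ (C : List (List Int)),
      rows.foldl (fun cols fila => (PySem.List.enumerate cols).map
          (fun jc => jc.2 ++ [PySem.List.pyGetD fila jc.1 0])) C =
        (PySem.List.enumerate C).map
          (fun p => p.2 ++ rows.map (fun fila => PySem.List.pyGetD fila p.1 0)) := by
  induction rows with
  | nil => intro C; simp [PySem.List.map_snd_enumerate]
  | cons f rs ih =>
      intro C
      simp only [List.foldl_cons, ih]
      rw [enumerate_map_enumerate (fun j col => col ++ [PySem.List.pyGetD f j 0]) C 0]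
      simp [List.map_map, Function.comp]

lemma enumerate_replicate_nil (n : Nat) : ∀ (s : Int),
    PySem.List.enumerate (List.replicate n ([] : List Int)) s =
      (PySem.List.pyRange s (s + n) 1).map (fun j => (j, ([] : List Int))) := by
  induction n with
  | zero => intro s; simp [PySem.List.enumerate_nil, PySem.List.pyRange]
  | succ m ih =>
      intro s
      have hb : s + ((m + 1 : Nat) : Int) = (s + 1) + (m : Int) := by push_cast; omega
      rw [List.replicate_succ, PySem.List.enumerate_cons,
        PySem.List.pyRange_one_cons (by push_cast; omega), hb, ih]
      simp

theorem deco_spec_aux (individuo : List (List Int)) (pistas_filas : List (List Int)) (pistas_columnas : List (List Int)) :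
    deco individuo pistas_filas pistas_columnas = deco_alt individuo pistas_filas pistas_columnas := by
  simp only [deco, deco_alt]
  rw [extraer_eq_rle, foldl_cols, enumerate_replicate_nil]
  simp [List.map_map, Function.comp]

-- ===== VERDICT (by name: the statement is the Claim_ definition above) =====
theorem deco_spec : Claim_equal_deco := by
  intro individuo pistas_filas pistas_columnas _ _
  unfold Spec_deco
  exact deco_spec_aux individuo pistas_filas pistas_columnas
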